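-- pv_equiv track=rewrite | github.com/Hetens/TinyLLM | sudoku/inspect_samples.py | _zebra_clues_as_strings
-- ===== SOURCE A (Python) =====
-- def _zebra_clues_as_strings(clues_list):
--     """Group tokenized clue list into full clue strings (split on CLUE_END token)."""
--     if not clues_list:
--         return []
--     try:
--         # Each clue ends with token "CLUE_END"
--         parts, current = [], []
--         for t in clues_list:
--             current.append(str(t))
--             if t == "CLUE_END":
--                 parts.append(" ".join(current))
--                 current = []
--         if current:
--             parts.append(" ".join(current))
--         return parts[:15]
--     except Exception:
--         return [str(clues_list[:15]) + "..."]
-- ===== SOURCE B (Python) =====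
-- def _zebra_clues_as_strings(clues_list):
--     """Group tokenized clue list into full clue strings (split on CLUE_END token)."""
--     if not clues_list:
--         return []
--     try:
--         parts = []
--         rest = [str(t) for t in clues_list]
--         while "CLUE_END" in rest:
--             k = rest.index("CLUE_END")
--             parts.append(" ".join(rest[:k + 1]))
--             rest = rest[k + 1:]
--         if rest:
--             parts.append(" ".join(rest))
--         return parts[:15]
--     except Exception:
--         return [str(clues_list[:15]) + "..."]
-- ===== Notes on version B (the rewrite author's own statement) =====
-- stated objective: alternative
-- what changed: Replaces the token-by-token accumulator loop with find-first-CLUE_END-then-slice: repeatedly locate the next CLUE_END, join the slice up to and including it, and continue on the remainder, joining any trailing leftover tokens.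
import Mathlib
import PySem

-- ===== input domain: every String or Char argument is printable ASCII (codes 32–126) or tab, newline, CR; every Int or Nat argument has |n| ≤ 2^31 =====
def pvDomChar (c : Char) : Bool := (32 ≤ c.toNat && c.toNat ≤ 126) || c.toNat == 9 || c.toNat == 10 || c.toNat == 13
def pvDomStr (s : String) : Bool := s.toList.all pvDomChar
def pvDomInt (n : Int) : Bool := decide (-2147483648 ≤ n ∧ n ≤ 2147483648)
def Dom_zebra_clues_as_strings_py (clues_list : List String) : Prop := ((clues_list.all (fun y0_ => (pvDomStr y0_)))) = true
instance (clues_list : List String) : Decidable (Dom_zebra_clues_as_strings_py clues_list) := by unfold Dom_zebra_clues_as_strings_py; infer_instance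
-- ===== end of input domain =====

-- B regroups by find-next-CLUE_END-and-slice instead of A's token accumulator loop; same cost, different decomposition.
-- A's `try` body cannot raise on a list of strings, so the `except` branch is dead and not ported.

-- ===== PORT A =====
-- str(t) on a Python str is the string itself, so `str(t)` is ported as `t`.
def zebra_clues_as_strings_py (clues_list : List String) : List String :=
  if clues_list = [] then []
  else
    let st := clues_list.foldl
      (fun (st : List String × List String) t =>
        let current := st.2 ++ [t]
        if t = "CLUE_END" then (st.1 ++ [PySem.Str.join " " current], ([] : List String))
        else (st.1, current)) (([] : List String), ([] : List String))
    let parts := if st.2 ≠ [] then st.1 ++ [PySem.Str.join " " st.2] else st.1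
    PySem.List.slice parts none (some 15)

-- ===== PORT B =====
-- the `while "CLUE_END" in rest` loop of Source B; rest strictly shrinks (k+1 elements removed)
def zebraAltLoop (parts : List String) (rest : List String) : List String :=
  if _hmem : "CLUE_END" ∈ rest then
    match hk : PySem.List.index? rest "CLUE_END" with
    | some k =>
        zebraAltLoop (parts ++ [PySem.Str.join " " (PySem.List.slice rest none (some ((k : Int) + 1)))])
                     (PySem.List.slice rest (some ((k : Int) + 1)) none)
    | none => parts  -- unreachable: "CLUE_END" ∈ rest guarantees index? returns some
  else if rest ≠ [] then parts ++ [PySem.Str.join " " rest] else parts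
termination_by rest.length
decreasing_by
  obtain ⟨pre, suf, hrest, -, -⟩ := ((PySem.List.index?_eq_some_iff _ _ _).mp hk)
  have : ((k : Int) + 1) = ((k + 1 : Nat) : Int) := by push_cast; ring
  rw [this, PySem.List.slice_from_natCast]
  subst hrest; simp [List.length_drop]

def zebra_clues_as_strings_py_alt (clues_list : List String) : List String :=
  if clues_list = [] then []
  else
    PySem.List.slice (zebraAltLoop [] (clues_list.map (fun t => t))) none (some 15)

-- ===== PRECONDITION & SPEC =====
def Spec_zebra_clues_as_strings_py (clues_list : List String) (out : List String) : Prop := out = zebra_clues_as_strings_py_alt clues_list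
instance (clues_list : List String) (out : List String) : Decidable (Spec_zebra_clues_as_strings_py clues_list out) := by unfold Spec_zebra_clues_as_strings_py; infer_instance

-- ===== CLAIM (what is proved, stated in full; the proofs are below) =====
def Claim_equal_zebra_clues_as_strings_py : Prop := ∀ (clues_list : List String), Dom_zebra_clues_as_strings_py clues_list → Spec_zebra_clues_as_strings_py clues_list (zebra_clues_as_strings_py clues_list)

-- ===== LEMMAS AND PROOFS =====

/-- canonical grouping both programs compute -/
def zebraGrp (cur : List String) : List String → List String
  | [] => if cur = [] then [] else [PySem.Str.join " " cur]
  | t :: ts =>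
      if t = "CLUE_END" then PySem.Str.join " " (cur ++ [t]) :: zebraGrp [] ts
      else zebraGrp (cur ++ [t]) ts

theorem foldA_eq_grp (l : List String) : ∀ (parts cur : List String),
    (let st := l.foldl
      (fun (st : List String × List String) t =>
        let current := st.2 ++ [t]
        if t = "CLUE_END" then (st.1 ++ [PySem.Str.join " " current], ([] : List String))
        else (st.1, current)) (parts, cur)
     if st.2 ≠ [] then st.1 ++ [PySem.Str.join " " st.2] else st.1)
    = parts ++ zebraGrp cur l := by
  induction l with
  | nil =>
    intro parts cur
    simp only [List.foldl, zebraGrp]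
    by_cases h : cur = [] <;> simp [h]
  | cons t ts ih =>
    intro parts cur
    simp only [List.foldl, zebraGrp]
    by_cases h : t = "CLUE_END"
    · simp only [h]
      rw [ih]
      simp
    · simp only [if_neg h]
      rw [ih]

theorem grp_of_not_mem (l : List String) : ∀ (cur : List String), "CLUE_END" ∉ l →
    zebraGrp cur l = if cur ++ l = [] then [] else [PySem.Str.join " " (cur ++ l)] := by
  induction l with
  | nil => intro cur _; simp [zebraGrp]
  | cons t ts ih =>
    intro cur hnm
    have ht : t ≠ "CLUE_END" := fun h => hnm (h ▸ List.mem_cons_self)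
    have hts : "CLUE_END" ∉ ts := fun h => hnm (List.mem_cons_of_mem _ h)
    simp only [zebraGrp, if_neg ht]
    rw [ih _ hts]
    simp

theorem grp_split (pre : List String) : ∀ (cur suf : List String), "CLUE_END" ∉ pre →
    zebraGrp cur (pre ++ "CLUE_END" :: suf)
      = PySem.Str.join " " (cur ++ pre ++ ["CLUE_END"]) :: zebraGrp [] suf := by
  induction pre with
  | nil => intro cur suf _; simp [zebraGrp]
  | cons p ps ih =>
    intro cur suf hnm
    have hp : p ≠ "CLUE_END" := fun h => hnm (h ▸ List.mem_cons_self)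
    have hps : "CLUE_END" ∉ ps := fun h => hnm (List.mem_cons_of_mem _ h)
    simp only [List.cons_append, zebraGrp, if_neg hp]
    rw [ih _ _ hps]
    simp

theorem altLoop_eq_grp (n : Nat) : ∀ (rest : List String), rest.length = n →
    ∀ (parts : List String), zebraAltLoop parts rest = parts ++ zebraGrp [] rest := by
  induction n using Nat.strong_induction_on with
  | _ n ih =>
    intro rest hn parts
    rw [zebraAltLoop.eq_def]
    by_cases hmem : "CLUE_END" ∈ rest
    · simp only [dif_pos hmem]
      have hsome : ∃ k, PySem.List.index? rest "CLUE_END" = some k := by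
        rcases Option.isSome_iff_exists.mp ((PySem.List.index?_isSome_iff _ _).mpr hmem) with ⟨k, hk⟩
        exact ⟨k, hk⟩
      obtain ⟨k, hk⟩ := hsome
      rw [hk]
      dsimp only
      obtain ⟨pre, suf, hrest, hlen, hnotin⟩ := (PySem.List.index?_eq_some_iff _ _ _).mp hk
      have hcast : ((k : Int) + 1) = ((k + 1 : Nat) : Int) := by push_cast; ring
      rw [hcast, PySem.List.slice_from_natCast, PySem.List.slice_to_natCast]
      subst hrest
      have htake : (pre ++ "CLUE_END" :: suf).take (k + 1) = pre ++ ["CLUE_END"] := by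
        rw [← hlen]; simp [List.take_append]
      have hdrop : (pre ++ "CLUE_END" :: suf).drop (k + 1) = suf := by
        rw [← hlen]; simp [List.drop_append]
      rw [htake, hdrop]
      have hsuf : suf.length < n := by
        subst hn; simp; omega
      rw [ih suf.length hsuf suf rfl]
      rw [grp_split pre [] suf hnotin]
      simp
    · simp only [dif_neg hmem]
      rw [grp_of_not_mem rest [] hmem]
      by_cases h : rest = [] <;> simp [h]

-- ===== VERDICT (by name: the statement is the Claim_ definition above) =====
theorem zebra_clues_as_strings_py_spec : Claim_equal_zebra_clues_as_strings_py := by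
  intro clues_list _
  unfold Spec_zebra_clues_as_strings_py zebra_clues_as_strings_py zebra_clues_as_strings_py_alt
  by_cases h : clues_list = []
  · simp [h]
  · simp only [if_neg h, List.map_id_fun', id]
    rw [altLoop_eq_grp clues_list.length clues_list rfl []]
    rw [foldA_eq_grp clues_list [] []]
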